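-- pv_equiv track=rewrite | github.com/Yankovsky/yandex-algos-training | hw3/e.py | open_calculator
-- ===== SOURCE A (Python) =====
-- def open_calculator(buttons, num):
--     buttons_set = set(map(str, buttons))
--     missing_counter = 0
--     for digit in str(num):
--         if digit not in buttons_set:
--             missing_counter += 1
--             buttons_set.add(digit)
--     return missing_counter
-- ===== SOURCE B (Python) =====
-- def open_calculator(buttons, num):
--     s = str(num)
--     bs = list(map(str, buttons))
--     count = 0
--     for c in "0123456789-":
--         if c in s and c not in bs:
--             count += 1
--     return count
-- ===== Notes on version B (the rewrite author's own statement) =====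
-- stated objective: alternative
-- what changed: B iterates over the fixed 11-character alphabet '0123456789-' (the only characters str(int) can contain) and counts those present in str(num) but absent from the button strings, instead of A's scan over str(num) with an incrementing counter and a mutating seen-set.
import Mathlib
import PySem

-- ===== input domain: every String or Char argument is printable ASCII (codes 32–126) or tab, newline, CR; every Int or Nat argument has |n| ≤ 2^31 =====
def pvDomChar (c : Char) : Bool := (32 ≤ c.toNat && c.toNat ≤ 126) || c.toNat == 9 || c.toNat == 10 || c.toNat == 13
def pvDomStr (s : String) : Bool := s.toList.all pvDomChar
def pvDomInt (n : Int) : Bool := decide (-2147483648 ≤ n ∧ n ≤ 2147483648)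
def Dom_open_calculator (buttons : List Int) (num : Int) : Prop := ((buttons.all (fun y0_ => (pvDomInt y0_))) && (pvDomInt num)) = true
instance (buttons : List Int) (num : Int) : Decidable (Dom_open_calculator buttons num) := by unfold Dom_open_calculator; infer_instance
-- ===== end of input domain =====

-- B counts over the fixed alphabet "0123456789-" instead of scanning str(num) with a mutating seen-set (alternative decomposition, same cost).


-- ===== PORT A =====
-- A: build set(map(str, buttons)), loop over str(num), count chars not yet in the set, adding them.
def open_calculator (buttons : List Int) (num : Int) : Int :=
  let buttonsSet : PySem.Set String := PySem.Set.ofList (buttons.map PySem.Int.toStr)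
  let st := (PySem.Int.toStr num).toList.foldl
    (fun (st : PySem.Set String × Int) c =>
      let digit := String.ofList [c]
      if PySem.Set.contains st.1 digit then st
      else (PySem.Set.add st.1 digit, st.2 + 1))
    (buttonsSet, 0)
  st.2

-- ===== PORT B =====
-- B: for c in "0123456789-": count c if c in str(num) and c not in the button-string list.
-- ('c in s' for a single-character c is exactly char membership in s's characters.)
def open_calculator_alt (buttons : List Int) (num : Int) : Int :=
  let s := (PySem.Int.toStr num).toList
  let bs := buttons.map PySem.Int.toStr
  "0123456789-".toList.foldl
    (fun (count : Int) c =>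
      if c ∈ s ∧ String.ofList [c] ∉ bs then count + 1 else count) 0

-- ===== PRECONDITION & SPEC =====
def Spec_open_calculator (buttons : List Int) (num : Int) (out : Int) : Prop := out = open_calculator_alt buttons num
instance (buttons : List Int) (num : Int) (out : Int) : Decidable (Spec_open_calculator buttons num out) := by unfold Spec_open_calculator; infer_instance

-- ===== CLAIM (what is proved, stated in full; the proofs are below) =====
def Claim_equal_open_calculator : Prop := ∀ (buttons : List Int) (num : Int), Dom_open_calculator buttons num → Spec_open_calculator buttons num (open_calculator buttons num)

-- ===== LEMMAS AND PROOFS =====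

-- A's loop from state (s, cnt) returns cnt plus the number of distinct
-- one-char strings of L that are not in s.
theorem pv_fold_count (L : List Char) (s : PySem.Set String) (cnt : Int) :
    (L.foldl (fun (st : PySem.Set String × Int) c =>
        let digit := String.ofList [c]
        if PySem.Set.contains st.1 digit then st
        else (PySem.Set.add st.1 digit, st.2 + 1)) (s, cnt)).2
    = cnt + (((L.map (fun c => String.ofList [c])).toFinset.filter (fun d => d ∉ s)).card : Int) := by
  induction L generalizing s cnt with
  | nil => simp
  | cons c L ih =>
    simp only [List.foldl_cons, List.map_cons, List.toFinset_cons]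
    by_cases h : String.ofList [c] ∈ s
    · rw [if_pos (by simpa [PySem.Set.contains_iff] using h), ih,
        Finset.filter_insert, if_neg (by simp [h])]
    · rw [if_neg (by simpa [PySem.Set.contains_iff] using h), ih,
        Finset.filter_insert, if_pos (by simp [h])]
      have hfe : (L.map (fun c => String.ofList [c])).toFinset.filter
            (fun d => d ∉ PySem.Set.add s (String.ofList [c]))
          = ((L.map (fun c => String.ofList [c])).toFinset.filter (fun d => d ∉ s)).erase
              (String.ofList [c]) := by
        ext x
        simp [PySem.Set.mem_add, Finset.mem_erase]
        tauto
      rw [hfe]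
      by_cases hm : String.ofList [c] ∈ (L.map (fun c => String.ofList [c])).toFinset.filter (fun d => d ∉ s)
      · rw [Finset.card_erase_of_mem hm,
          Finset.card_insert_of_mem hm]
        have hpos := Finset.card_pos.mpr ⟨_, hm⟩
        push_cast [Nat.cast_sub hpos]
        omega
      · rw [Finset.erase_eq_of_notMem hm, Finset.card_insert_of_notMem hm]
        push_cast
        omega

-- B's loop counts the alphabet characters satisfying the predicate.
theorem pv_fold_alpha (A : List Char) (p : Char → Prop) [DecidablePred p] (cnt : Int) :
    (A.foldl (fun (count : Int) c => if p c then count + 1 else count) cnt)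
    = cnt + ((A.filter (fun c => decide (p c))).length : Int) := by
  induction A generalizing cnt with
  | nil => simp
  | cons c A ih =>
    simp only [List.foldl_cons, List.filter_cons]
    by_cases h : p c <;> simp [h, ih] <;> push_cast <;> omega

-- Every character of str(num) lies in the alphabet "0123456789-".
theorem pv_toDigitsCore_mem (fuel n : Nat) (acc : List Char) (c : Char)
    (hacc : ∀ d ∈ acc, d ∈ "0123456789-".toList)
    (hc : c ∈ Nat.toDigitsCore 10 fuel n acc) : c ∈ "0123456789-".toList := by
  induction fuel generalizing n acc with
  | zero => exact hacc c hc
  | succ fuel ih =>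
    have hd : Nat.digitChar (n % 10) ∈ "0123456789-".toList := by
      have : n % 10 < 10 := Nat.mod_lt _ (by omega)
      interval_cases h : n % 10 <;> simp [Nat.digitChar]
    have hacc' : ∀ d ∈ Nat.digitChar (n % 10) :: acc, d ∈ "0123456789-".toList := by
      intro d hdm
      rcases List.mem_cons.mp hdm with h1 | h1
      · simpa [h1] using hd
      · exact hacc d h1
    simp only [Nat.toDigitsCore] at hc
    by_cases h0 : n / 10 = 0
    · rw [if_pos h0] at hc
      exact hacc' c hc
    · rw [if_neg h0] at hc
      exact ih _ _ hacc' hc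

theorem pv_toChars_mem (num : Int) (c : Char) (hc : c ∈ PySem.Int.toChars num) :
    c ∈ "0123456789-".toList := by
  unfold PySem.Int.toChars at hc
  by_cases h : num < 0
  · rw [if_pos h] at hc
    rcases List.mem_cons.mp hc with h1 | h1
    · simp [h1]
    · exact pv_toDigitsCore_mem _ _ _ _ (by simp) h1
  · rw [if_neg h] at hc
    exact pv_toDigitsCore_mem _ _ _ _ (by simp) hc

-- ===== VERDICT (by name: the statement is the Claim_ definition above) =====
theorem open_calculator_spec : Claim_equal_open_calculator := by
  intro buttons num _
  unfold Spec_open_calculator open_calculator open_calculator_alt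
  simp only []
  rw [pv_fold_count, pv_fold_alpha]
  set L := (PySem.Int.toStr num).toList with hL
  set bs := buttons.map PySem.Int.toStr with hbs
  have hsub : ∀ c ∈ L, c ∈ "0123456789-".toList := by
    intro c hc
    exact pv_toChars_mem num c (by simpa [hL, PySem.Int.toList_toStr] using hc)
  have halpha : ("0123456789-".toList.filter
        (fun c => decide (c ∈ L ∧ String.ofList [c] ∉ bs))).length
      = (L.toFinset.filter (fun c => String.ofList [c] ∉ bs)).card := by
    rw [← List.toFinset_card_of_nodup (List.Nodup.filter _ (by decide)),
      List.toFinset_filter]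
    congr 1
    ext c
    simp only [Finset.mem_filter, List.mem_toFinset, decide_eq_true_eq]
    constructor
    · rintro ⟨-, hcL, hnb⟩; exact ⟨hcL, hnb⟩
    · rintro ⟨hcL, hnb⟩; exact ⟨hsub c hcL, hcL, hnb⟩
  have himg : (L.map (fun c => String.ofList [c])).toFinset.filter
        (fun d => d ∉ PySem.Set.ofList bs)
      = (L.toFinset.filter (fun c => String.ofList [c] ∉ bs)).image
          (fun c => String.ofList [c]) := by
    ext x
    simp only [Finset.mem_image, Finset.mem_filter, List.mem_toFinset, List.mem_map,
      PySem.Set.mem_ofList]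
    constructor
    · rintro ⟨⟨c, hcL, rfl⟩, hnb⟩; exact ⟨c, ⟨hcL, hnb⟩, rfl⟩
    · rintro ⟨c, ⟨hcL, hnb⟩, rfl⟩; exact ⟨⟨c, hcL, rfl⟩, hnb⟩
  have hinj : Set.InjOn (fun c => String.ofList [c])
      ↑(L.toFinset.filter (fun c => String.ofList [c] ∉ bs)) := by
    intro a _ b _ hab
    have := congrArg String.toList hab
    simpa using this
  rw [himg, Finset.card_image_of_injOn hinj, halpha]
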